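-- pv_equiv track=rewrite | github.com/miliar/Code_Jam_Webscraper | solutions_python/Problem_117/1261.py | check_lawn
-- ===== SOURCE A (Python) =====
-- def check_lawn(lawn):
-- 	(rows, cols, normal, rot) = lawn
-- 	for rowidx in range(rows):
-- 		for colidx in range(cols):
-- 			patch = normal[rowidx][colidx]
-- 			possible = check_line(patch, normal[rowidx]) or check_line(patch, rot[colidx])
-- 			if not possible:
-- 				return False
--
-- 	return True
--
-- def check_line(val, line):
-- 	return val == max(line)
-- ===== SOURCE B (Python) =====
-- def check_lawn(lawn):
--     (rows, cols, normal, rot) = lawn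
--     if rows <= 0 or cols <= 0:
--         return True
--     row_max = [max(r) for r in normal]
--     col_max = [max(c) for c in rot]
--     return all(normal[i][j] == row_max[i] or normal[i][j] == col_max[j]
--                for i in range(rows) for j in range(cols))
-- ===== Notes on version B (the rewrite author's own statement) =====
-- stated objective: alternative
-- what changed: B precomputes all row maxima and all column maxima once and then checks each cell against the two tables, instead of recomputing max(row) and max(column) inside the per-cell loop.
-- outside the precondition, e.g. on check_lawn((1, 1, [[5]], [[]])): A returns True, B raises ValueError; on check_lawn((1, 1, [[5]], [])): A returns True, B returns True
import Mathlib
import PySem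

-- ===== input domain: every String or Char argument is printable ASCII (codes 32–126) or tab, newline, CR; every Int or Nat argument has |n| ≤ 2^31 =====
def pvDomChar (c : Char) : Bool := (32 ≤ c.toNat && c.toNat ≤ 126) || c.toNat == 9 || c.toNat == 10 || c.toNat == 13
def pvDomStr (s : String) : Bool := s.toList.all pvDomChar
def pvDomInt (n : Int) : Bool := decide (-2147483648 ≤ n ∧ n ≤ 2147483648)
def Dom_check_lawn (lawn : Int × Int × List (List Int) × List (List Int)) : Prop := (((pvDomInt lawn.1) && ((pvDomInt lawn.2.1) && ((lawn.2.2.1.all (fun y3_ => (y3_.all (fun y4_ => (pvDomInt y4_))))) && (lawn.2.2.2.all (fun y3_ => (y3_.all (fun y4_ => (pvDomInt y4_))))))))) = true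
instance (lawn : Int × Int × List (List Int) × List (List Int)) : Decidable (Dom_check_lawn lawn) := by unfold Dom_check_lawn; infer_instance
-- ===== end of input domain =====

-- B precomputes all row maxima and all column maxima once and checks each cell against the
-- two tables, instead of recomputing max(row) and max(column) per cell (objective: alternative).

-- ===== PORT A =====
-- check_line(val, line): val == max(line); Python max([]) raises, so `none` (excluded by Pre_)
-- is mapped to an arbitrary value, never reached inside Pre_.
def pvCheckLine (val : Int) (line : List Int) : Bool :=
  match PySem.List.max? line (fun y => y) with
  | some m => val == m
  | none => false

def check_lawn (lawn : Int × Int × List (List Int) × List (List Int)) : Bool :=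
  match lawn with
  | (rows, cols, normal, rot) =>
    -- nested for-loops with early `return False` ≡ all/all
    (PySem.List.pyRange 0 rows 1).all (fun rowidx =>
      (PySem.List.pyRange 0 cols 1).all (fun colidx =>
        let patch := PySem.List.pyGetD (PySem.List.pyGetD normal rowidx []) colidx 0
        pvCheckLine patch (PySem.List.pyGetD normal rowidx []) ||
          pvCheckLine patch (PySem.List.pyGetD rot colidx [])))

-- ===== PORT B =====
def check_lawn_alt (lawn : Int × Int × List (List Int) × List (List Int)) : Bool :=
  match lawn with
  | (rows, cols, normal, rot) =>
    if rows ≤ 0 || cols ≤ 0 then true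
    else
      let rowMax := normal.map (fun r => (PySem.List.max? r (fun y => y)).getD 0)
      let colMax := rot.map (fun c => (PySem.List.max? c (fun y => y)).getD 0)
      (PySem.List.pyRange 0 rows 1).all (fun i =>
        (PySem.List.pyRange 0 cols 1).all (fun j =>
          let v := PySem.List.pyGetD (PySem.List.pyGetD normal i []) j 0
          (v == PySem.List.pyGetD rowMax i 0) || (v == PySem.List.pyGetD colMax j 0)))

-- ===== PRECONDITION & SPEC =====
-- Pre_ admits the degenerate grids (rows ≤ 0 or cols ≤ 0, where no cell is inspected) and the
-- well-shaped lawns: `normal` has `rows` rows of `cols` cells and `rot` (the transposed grid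
-- the caller builds) has `cols` rows of `rows` cells.  This
-- excludes some ill-shaped inputs on which A still returns only because the boolean
-- short-circuit or an empty range happens to skip the offending access (e.g. a `rot` line
-- that is empty but never inspected); on most ill-shaped inputs A raises.
def Pre_check_lawn (lawn : Int × Int × List (List Int) × List (List Int)) : Prop :=
  lawn.1 ≤ 0 ∨ lawn.2.1 ≤ 0 ∨
  (lawn.1 = (lawn.2.2.1.length : Int) ∧
   lawn.2.1 = (lawn.2.2.2.length : Int) ∧
   (∀ r ∈ lawn.2.2.1, (r.length : Int) = lawn.2.1) ∧
   (∀ c ∈ lawn.2.2.2, (c.length : Int) = lawn.1))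
instance (lawn : Int × Int × List (List Int) × List (List Int)) : Decidable (Pre_check_lawn lawn) := by unfold Pre_check_lawn; infer_instance

def pvWitness_check_lawn : (Int × Int × List (List Int) × List (List Int)) :=
  (2, 2, [[1, 2], [3, 4]], [[1, 3], [2, 4]])

def Spec_check_lawn (lawn : Int × Int × List (List Int) × List (List Int)) (out : Bool) : Prop := out = check_lawn_alt lawn
instance (lawn : Int × Int × List (List Int) × List (List Int)) (out : Bool) : Decidable (Spec_check_lawn lawn out) := by unfold Spec_check_lawn; infer_instance

-- ===== CLAIM (what is proved, stated in full; the proofs are below) =====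
def Claim_equal_check_lawn : Prop := ∀ (lawn : Int × Int × List (List Int) × List (List Int)), Dom_check_lawn lawn → Pre_check_lawn lawn → Spec_check_lawn lawn (check_lawn lawn)

-- ===== LEMMAS AND PROOFS =====

lemma pv_all_congr {α : Type} {l : List α} {f g : α → Bool}
    (h : ∀ x ∈ l, f x = g x) : l.all f = l.all g := by
  induction l with
  | nil => rfl
  | cons a t ih =>
      simp only [List.all_cons, h a (List.mem_cons_self), ih (fun x hx => h x (List.mem_cons_of_mem a hx))]

lemma pv_checkLine_eq (v : Int) (line : List Int) (h : line ≠ []) :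
    pvCheckLine v line = (v == (PySem.List.max? line (fun y => y)).getD 0) := by
  unfold pvCheckLine
  rcases hm : PySem.List.max? line (fun y => y) with _ | m
  · exact absurd ((PySem.List.max?_eq_none_iff line (fun y => y)).mp hm) h
  · rfl

-- ===== VERDICT (by name: the statement is the Claim_ definition above) =====
theorem check_lawn_spec : Claim_equal_check_lawn := by
  intro lawn _hdom hpre
  obtain ⟨rows, cols, normal, rot⟩ := lawn
  dsimp only [Pre_check_lawn] at hpre
  simp only [Spec_check_lawn, check_lawn, check_lawn_alt]
  by_cases hz : rows ≤ 0 || cols ≤ 0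
  · -- degenerate grid: no cell is inspected by either side
    rw [if_pos hz]
    rcases Bool.or_eq_true_iff.mp hz with h | h
    · rw [PySem.List.pyRange_one_eq_nil (by exact_mod_cast (by simpa using h : rows ≤ 0))]
      rfl
    · have : PySem.List.pyRange 0 cols 1 = [] :=
        PySem.List.pyRange_one_eq_nil (by simpa using h)
      simp [this]
  · rw [if_neg hz]
    simp only [Bool.or_eq_true_iff, not_or, decide_eq_true_eq] at hz
    have hr0 : 0 < rows := by omega
    have hc0 : 0 < cols := by omega
    obtain ⟨hrows, hcols, hnorm, hrot⟩ := hpre.resolve_left (by omega) |>.resolve_left (by omega)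
    apply pv_all_congr
    intro i hi
    have hi' := PySem.List.mem_pyRange_one.mp hi
    apply pv_all_congr
    intro j hj
    have hj' := PySem.List.mem_pyRange_one.mp hj
    -- the row and the column actually indexed
    have hiN : i.toNat < normal.length := by omega
    have hjN : j.toNat < rot.length := by omega
    have hrow : PySem.List.pyGetD normal i [] = normal[i.toNat] :=
      PySem.List.pyGetD_eq_getElem normal [] hi'.1 (by omega)
    have hcol : PySem.List.pyGetD rot j [] = rot[j.toNat] :=
      PySem.List.pyGetD_eq_getElem rot [] hj'.1 (by omega)
    have hrowne : normal[i.toNat] ≠ [] := by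
      have := hnorm normal[i.toNat] (List.getElem_mem hiN)
      intro h; rw [h] at this; simp at this; omega
    have hcolne : rot[j.toNat] ≠ [] := by
      have := hrot rot[j.toNat] (List.getElem_mem hjN)
      intro h; rw [h] at this; simp at this; omega
    have hrm : PySem.List.pyGetD (normal.map (fun r => (PySem.List.max? r (fun y => y)).getD 0)) i 0
        = (PySem.List.max? normal[i.toNat] (fun y => y)).getD 0 := by
      rw [PySem.List.pyGetD_eq_getElem _ (0:Int) hi'.1 (by simp; omega)]
      simp
    have hcm : PySem.List.pyGetD (rot.map (fun c => (PySem.List.max? c (fun y => y)).getD 0)) j 0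
        = (PySem.List.max? rot[j.toNat] (fun y => y)).getD 0 := by
      rw [PySem.List.pyGetD_eq_getElem _ (0:Int) hj'.1 (by simp; omega)]
      simp
    simp only [hrow, hcol, hrm, hcm,
      pv_checkLine_eq _ _ hrowne, pv_checkLine_eq _ _ hcolne]
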